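-- pv_equiv track=rewrite | github.com/SeekScenery/codePractice | python/LinkList.py | solution
-- ===== SOURCE A (Python) =====
-- def solution(nums: list, len_1) -> int:
--     if len(nums) < 3:
--         return 0
--     count = 0
--     # 先遍历高塔
--     for i in range(1, len_1-1):
--         count_left = 0
--         count_right = 0
--         for j in range(0, i):
--             if nums[i] > nums[j]:
--                 count_left += 1
--         for j in range(i+1, len_1):
--             if nums[i] > nums[j]:
--                 count_right += 1
--         count += count_left * count_right
--
--     return count
-- ===== SOURCE B (Python) =====
-- def _lower_bound(s, v):
--     # first index p in sorted list s with s[p] >= v (hand-written binary search)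
--     lo, hi = 0, len(s)
--     while lo < hi:
--         mid = (lo + hi) // 2
--         if s[mid] < v:
--             lo = mid + 1
--         else:
--             hi = mid
--     return lo
--
--
-- def solution(nums: list, len_1) -> int:
--     if len(nums) < 3 or len_1 < 3:
--         return 0
--     a = nums[:len_1]
--     # left[i] = how many of a[0..i-1] are smaller than a[i]: kept sorted, read off the insertion point
--     left = []
--     s = []
--     for x in a:
--         p = _lower_bound(s, x)
--         left.append(p)
--         s.insert(p, x)
--     # right[i] = how many of a[i+1..] are smaller than a[i]: same sweep from the right
--     right = []
--     s = []
--     for x in reversed(a):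
--         p = _lower_bound(s, x)
--         right.append(p)
--         s.insert(p, x)
--     right.reverse()
--     total = 0
--     for i in range(1, len(a) - 1):
--         total += left[i] * right[i]
--     return total
-- ===== Notes on version B (the rewrite author's own statement) =====
-- stated objective: alternative
-- what changed: Instead of re-scanning the whole prefix and suffix for every middle index, B makes one forward and one backward sweep that maintain a sorted list of the elements seen so far and read each smaller-count off a hand-written binary-search insertion point, then sums left[i]*right[i].
import Mathlib
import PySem

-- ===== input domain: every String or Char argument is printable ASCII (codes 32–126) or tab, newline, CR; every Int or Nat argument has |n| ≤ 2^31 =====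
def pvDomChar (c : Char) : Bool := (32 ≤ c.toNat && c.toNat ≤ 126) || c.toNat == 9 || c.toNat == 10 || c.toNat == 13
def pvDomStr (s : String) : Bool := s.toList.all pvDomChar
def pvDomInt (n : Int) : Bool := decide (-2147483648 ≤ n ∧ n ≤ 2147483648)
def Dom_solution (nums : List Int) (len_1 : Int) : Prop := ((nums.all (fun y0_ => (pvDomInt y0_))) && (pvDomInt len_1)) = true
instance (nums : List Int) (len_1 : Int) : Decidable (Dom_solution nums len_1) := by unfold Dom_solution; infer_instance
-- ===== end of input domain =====

-- B replaces A's per-index rescans of prefix and suffix by two sweeps that keep a sorted list and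
-- read each smaller-count off a binary-search insertion point.

-- ===== PORT A =====
def solution (nums : List Int) (len_1 : Int) : Int :=
  if nums.length < 3 then 0
  else
    (PySem.List.pyRange 1 (len_1 - 1) 1).foldl (fun count i =>
      let count_left :=
        (PySem.List.pyRange 0 i 1).foldl (fun c j =>
          if PySem.List.pyGetD nums i 0 > PySem.List.pyGetD nums j 0 then c + 1 else c) 0
      let count_right :=
        (PySem.List.pyRange (i + 1) len_1 1).foldl (fun c j =>
          if PySem.List.pyGetD nums i 0 > PySem.List.pyGetD nums j 0 then c + 1 else c) 0
      count + count_left * count_right) 0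

-- ===== PORT B =====
-- _lower_bound: hand-written binary search; s[mid] is always in range (mid < hi ≤ s.length), so getD is exact
-- fuel-totalised loop (hi - lo shrinks every iteration, so fuel = initial list length suffices)
def lowerBoundGo (s : List Int) (v : Int) : Nat → Nat → Nat → Nat
  | 0, lo, _ => lo
  | fuel + 1, lo, hi =>
    if lo < hi then
      let mid := (lo + hi) / 2
      if s.getD mid 0 < v then lowerBoundGo s v fuel (mid + 1) hi else lowerBoundGo s v fuel lo mid
    else lo

def lowerBound (s : List Int) (v : Int) : Nat := lowerBoundGo s v s.length 0 s.length

-- one step of a sweep: state = (sorted list s, counts so far); p = _lower_bound(s, x); s.insert(p, x)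
def sweepStep (st : List Int × List Int) (x : Int) : List Int × List Int :=
  let p := lowerBound st.1 x
  (PySem.List.insert st.1 (p : Int) x, st.2 ++ [(p : Int)])

def solution_alt (nums : List Int) (len_1 : Int) : Int :=
  if nums.length < 3 ∨ len_1 < 3 then 0
  else
    let a := PySem.List.slice nums none (some len_1)
    let left := (a.foldl sweepStep ([], [])).2
    let right := ((a.reverse.foldl sweepStep ([], [])).2).reverse
    (PySem.List.pyRange 1 ((a.length : Int) - 1) 1).foldl
      (fun total i => total + PySem.List.pyGetD left i 0 * PySem.List.pyGetD right i 0) 0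

-- ===== PRECONDITION & SPEC =====
-- A raises IndexError when len(nums) ≥ 3 and 3 ≤ len_1 but len_1 > len(nums); exactly those inputs are excluded.
def Pre_solution (nums : List Int) (len_1 : Int) : Prop :=
  nums.length < 3 ∨ len_1 < 3 ∨ len_1 ≤ nums.length
instance (nums : List Int) (len_1 : Int) : Decidable (Pre_solution nums len_1) := by
  unfold Pre_solution; infer_instance

def pvWitness_solution : List Int × Int := ([2, 1, 3, 1, 0], 5)

def Spec_solution (nums : List Int) (len_1 : Int) (out : Int) : Prop := out = solution_alt nums len_1
instance (nums : List Int) (len_1 : Int) (out : Int) : Decidable (Spec_solution nums len_1 out) := by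
  unfold Spec_solution; infer_instance

-- ===== CLAIM (what is proved, stated in full; the proofs are below) =====
def Claim_equal_solution : Prop := ∀ (nums : List Int) (len_1 : Int), Dom_solution nums len_1 → Pre_solution nums len_1 → Spec_solution nums len_1 (solution nums len_1)

-- ===== LEMMAS AND PROOFS =====

-- specification list of smaller-counts: (lcounts pre l)[i] counts elements of pre ++ l.take i smaller than l[i]
def lcounts (pre : List Int) : List Int → List Int
  | [] => []
  | x :: r => ((pre.countP (fun y => decide (y < x)) : Nat) : Int) :: lcounts (pre ++ [x]) r

theorem length_lcounts (l : List Int) : ∀ pre, (lcounts pre l).length = l.length := by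
  induction l with
  | nil => intro pre; rfl
  | cons x r ih => intro pre; simp [lcounts, ih]

theorem sorted_getD_mono {s : List Int} (hs : s.Pairwise (· ≤ ·)) {i j : Nat}
    (hij : i ≤ j) (hj : j < s.length) : s.getD i 0 ≤ s.getD j 0 := by
  rcases Nat.eq_or_lt_of_le hij with rfl | hlt
  · exact le_refl _
  · have := (List.pairwise_iff_getElem.mp hs) i j (by omega) hj hlt
    rw [List.getD_eq_getElem _ _ (by omega), List.getD_eq_getElem _ _ hj]
    exact this

theorem countP_of_split {s : List Int} {v : Int} {r : Nat} (hr : r ≤ s.length)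
    (h1 : ∀ k, k < r → s.getD k 0 < v)
    (h2 : ∀ k, r ≤ k → k < s.length → ¬ s.getD k 0 < v) :
    s.countP (fun y => decide (y < v)) = r := by
  conv_lhs => rw [← List.take_append_drop r s]
  rw [List.countP_append]
  have ht : (s.take r).countP (fun y => decide (y < v)) = (s.take r).length := by
    rw [List.countP_eq_length]
    intro y hy
    obtain ⟨k, hk, rfl⟩ := List.mem_iff_getElem.mp hy
    have hmin : k < min r s.length := by simpa using hk
    have hk' : k < r := by omega
    have hkl : k < s.length := by omega
    have := h1 k hk'
    rw [List.getD_eq_getElem _ _ hkl] at this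
    simpa [List.getElem_take] using this
  have hd : (s.drop r).countP (fun y => decide (y < v)) = 0 := by
    rw [List.countP_eq_zero]
    intro y hy
    obtain ⟨k, hk, rfl⟩ := List.mem_iff_getElem.mp hy
    have hlen : k < s.length - r := by simpa using hk
    have hkl : r + k < s.length := by omega
    have := h2 (r + k) (by omega) hkl
    rw [List.getD_eq_getElem _ _ hkl] at this
    simpa [List.getElem_drop] using this
  rw [ht, hd, List.length_take]
  omega

theorem lowerBoundGo_spec (s : List Int) (v : Int) (hs : s.Pairwise (· ≤ ·)) :
    ∀ fuel lo hi, hi - lo ≤ fuel → lo ≤ hi → hi ≤ s.length →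
    (∀ k, k < lo → s.getD k 0 < v) →
    (∀ k, hi ≤ k → k < s.length → ¬ s.getD k 0 < v) →
    (∀ k, k < lowerBoundGo s v fuel lo hi → s.getD k 0 < v) ∧
    (∀ k, lowerBoundGo s v fuel lo hi ≤ k → k < s.length → ¬ s.getD k 0 < v) ∧
    lo ≤ lowerBoundGo s v fuel lo hi ∧ lowerBoundGo s v fuel lo hi ≤ hi := by
  intro fuel
  induction fuel with
  | zero =>
    intro lo hi hfuel hlh hhl h1 h2
    simp only [lowerBoundGo]
    exact ⟨h1, fun k hk hkl => h2 k (by omega) hkl, le_refl _, hlh⟩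
  | succ fuel ih =>
    intro lo hi hfuel hlh hhl h1 h2
    simp only [lowerBoundGo]
    by_cases hcase : lo < hi
    · simp only [if_pos hcase]
      by_cases hv : s.getD ((lo + hi) / 2) 0 < v
      · simp only [if_pos hv]
        have h1' : ∀ k, k < (lo + hi) / 2 + 1 → s.getD k 0 < v := fun k hk =>
          lt_of_le_of_lt (sorted_getD_mono hs (by omega) (by omega)) hv
        have := ih ((lo + hi) / 2 + 1) hi (by omega) (by omega) hhl h1' h2
        exact ⟨this.1, this.2.1, by omega, this.2.2.2⟩
      · simp only [if_neg hv]
        have h2' : ∀ k, (lo + hi) / 2 ≤ k → k < s.length → ¬ s.getD k 0 < v := fun k hk hkl hlt =>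
          hv (lt_of_le_of_lt (sorted_getD_mono hs hk hkl) hlt)
        have := ih lo ((lo + hi) / 2) (by omega) (by omega) (by omega) h1 h2'
        exact ⟨this.1, this.2.1, this.2.2.1, by omega⟩
    · simp only [if_neg hcase]
      exact ⟨h1, fun k hk hkl => h2 k (by omega) hkl, le_refl _, hlh⟩

theorem lowerBound_spec {s : List Int} (v : Int) (hs : s.Pairwise (· ≤ ·)) :
    (∀ k, k < lowerBound s v → s.getD k 0 < v) ∧
    (∀ k, lowerBound s v ≤ k → k < s.length → ¬ s.getD k 0 < v) ∧
    lowerBound s v ≤ s.length ∧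
    lowerBound s v = s.countP (fun y => decide (y < v)) := by
  have h := lowerBoundGo_spec s v hs s.length 0 s.length (by omega) (by omega) (le_refl _)
    (fun k hk => absurd hk (by omega)) (fun k hk hkl => absurd hkl (by omega))
  refine ⟨h.1, h.2.1, h.2.2.2, ?_⟩
  exact (countP_of_split h.2.2.2 h.1 h.2.1).symm

theorem insert_lowerBound_sorted {s : List Int} (v : Int) (hs : s.Pairwise (· ≤ ·)) :
    (PySem.List.insert s ((lowerBound s v : Nat) : Int) v).Pairwise (· ≤ ·) := by
  obtain ⟨h1, h2, hle, -⟩ := lowerBound_spec v hs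
  rw [PySem.List.insert_natCast s _ v hle]
  have mem_take : ∀ y ∈ s.take (lowerBound s v), y < v := by
    intro y hy
    obtain ⟨k, hk, rfl⟩ := List.mem_iff_getElem.mp hy
    have hmin : k < min (lowerBound s v) s.length := by simpa using hk
    have := h1 k (by omega)
    rw [List.getD_eq_getElem _ _ (by omega)] at this
    simpa [List.getElem_take] using this
  have mem_drop : ∀ y ∈ s.drop (lowerBound s v), v ≤ y := by
    intro y hy
    obtain ⟨k, hk, rfl⟩ := List.mem_iff_getElem.mp hy
    have hlen : k < s.length - lowerBound s v := by simpa using hk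
    have := h2 (lowerBound s v + k) (by omega) (by omega)
    rw [List.getD_eq_getElem _ _ (by omega)] at this
    rw [List.getElem_drop]
    omega
  rw [List.pairwise_append]
  refine ⟨hs.sublist (List.take_sublist _ _), ?_, ?_⟩
  · rw [List.pairwise_cons]
    exact ⟨mem_drop, hs.sublist (List.drop_sublist _ _)⟩
  · intro x hx y hy
    rcases List.mem_cons.mp hy with rfl | hy'
    · exact le_of_lt (mem_take x hx)
    · exact le_trans (le_of_lt (mem_take x hx)) (mem_drop y hy')

theorem insert_lowerBound_perm {s : List Int} (v : Int) (hs : s.Pairwise (· ≤ ·)) :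
    (PySem.List.insert s ((lowerBound s v : Nat) : Int) v).Perm (v :: s) := by
  obtain ⟨-, -, hle, -⟩ := lowerBound_spec v hs
  rw [PySem.List.insert_natCast s _ v hle]
  have := List.perm_middle (a := v) (l₁ := s.take (lowerBound s v)) (l₂ := s.drop (lowerBound s v))
  simpa [List.take_append_drop] using this

theorem sweep_fold (rest : List Int) :
    ∀ (pre s acc : List Int), s.Perm pre → s.Pairwise (· ≤ ·) →
    (rest.foldl sweepStep (s, acc)).2 = acc ++ lcounts pre rest := by
  induction rest with
  | nil => intro pre s acc _ _; simp [lcounts]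
  | cons x r ih =>
    intro pre s acc hperm hsort
    have hcnt : lowerBound s x = pre.countP (fun y => decide (y < x)) := by
      rw [(lowerBound_spec x hsort).2.2.2, hperm.countP_eq]
    have hperm' : (PySem.List.insert s ((lowerBound s x : Nat) : Int) x).Perm (pre ++ [x]) := by
      refine ((insert_lowerBound_perm x hsort).trans (hperm.cons x)).trans ?_
      simpa using (List.perm_middle (a := x) (l₁ := pre) (l₂ := [])).symm
    rw [List.foldl_cons]
    rw [show sweepStep (s, acc) x = (PySem.List.insert s ((lowerBound s x : Nat) : Int) x,
          acc ++ [((lowerBound s x : Nat) : Int)]) from rfl]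
    rw [ih (pre ++ [x]) _ _ hperm' (insert_lowerBound_sorted x hsort)]
    simp [lcounts, hcnt]

theorem lcounts_getD (l : List Int) :
    ∀ pre (i : Nat) (hi : i < l.length),
    (lcounts pre l).getD i 0 = (((pre ++ l.take i).countP (fun y => decide (y < l[i])) : Nat) : Int) := by
  induction l with
  | nil => intro pre i hi; simp at hi
  | cons x r ih =>
    intro pre i hi
    cases i with
    | zero =>
      simp only [lcounts, List.getD_cons_zero, List.take_zero, List.append_nil, List.getElem_cons_zero]
      exact rfl
    | succ i =>
      have hi' : i < r.length := by simpa using hi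
      have := ih (pre ++ [x]) i hi'
      simpa [lcounts, List.append_assoc] using this

theorem left_getD (a : List Int) (i : Nat) (hi : i < a.length) :
    (lcounts [] a).getD i 0 = (((a.take i).countP (fun y => decide (y < a[i])) : Nat) : Int) := by
  simpa using lcounts_getD a [] i hi

theorem right_getD (a : List Int) (i : Nat) (hi : i < a.length) :
    ((lcounts [] a.reverse).reverse).getD i 0
      = (((a.drop (i + 1)).countP (fun y => decide (y < a[i])) : Nat) : Int) := by
  have hlen : (lcounts [] a.reverse).length = a.length := by
    rw [length_lcounts]; exact List.length_reverse
  have h1 := List.getD_reverse (l := lcounts [] a.reverse) i (by omega)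
  rw [congrFun h1 0, hlen, lcounts_getD a.reverse [] (a.length - 1 - i)
      (by simp only [List.length_reverse]; omega)]
  simp only [List.nil_append, List.take_reverse, List.countP_reverse, List.getElem_reverse,
    show a.length - (a.length - 1 - i) = i + 1 from by omega,
    show a.length - 1 - (a.length - 1 - i) = i from by omega]

-- A's inner counting loop over range(lo, hi) equals a countP over the corresponding window of nums
theorem foldl_count_range (nums : List Int) (v lo hi : Int) (h0 : 0 ≤ lo) (hlh : lo ≤ hi)
    (hhi : hi ≤ (nums.length : Int)) :
    (PySem.List.pyRange lo hi 1).foldl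
      (fun c j => if v > PySem.List.pyGetD nums j 0 then c + 1 else c) 0
    = ((((nums.take hi.toNat).drop lo.toNat).countP (fun y => decide (y < v)) : Nat) : Int) := by
  have hxslen : ((nums.take hi.toNat).length : Int) = hi := by
    simp [List.length_take]; omega
  have hcongr : (PySem.List.pyRange lo hi 1).foldl
      (fun c j => if v > PySem.List.pyGetD nums j 0 then c + 1 else c) (0 : Int)
      = (PySem.List.pyRange lo hi 1).foldl
      (fun c j => if v > PySem.List.pyGetD (nums.take hi.toNat) j 0 then c + 1 else c) (0 : Int) := by
    apply PySem.List.foldl_congr_mem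
    intro acc j hj
    obtain ⟨hj0, hj1⟩ := PySem.List.mem_pyRange_one.mp hj
    have hj0' : 0 ≤ j := by omega
    rw [PySem.List.pyGetD_eq_getElem _ _ hj0' (by omega),
        PySem.List.pyGetD_eq_getElem _ _ hj0' (by omega)]
    rw [List.getElem_take]
  rw [hcongr]
  have hrange : PySem.List.pyRange lo hi 1
      = PySem.List.pyRange lo (PySem.List.len (nums.take hi.toNat)) 1 := by
    rw [PySem.List.len_eq, hxslen]
  rw [hrange,
    PySem.List.foldl_pyRange_pyGetD (nums.take hi.toNat) 0
      (fun (c y : Int) => if v > y then c + 1 else c) (0 : Int) h0]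
  have hbody : (fun (c y : Int) => if v > y then c + 1 else c)
      = (fun (c y : Int) => if (fun y => decide (y < v)) y = true then c + 1 else c) := by
    funext c y; simp
  rw [hbody, PySem.List.foldl_count_if]
  simp

-- ===== VERDICT (by name: the statement is the Claim_ definition above) =====
theorem solution_spec : Claim_equal_solution := by
  intro nums len_1 _ hpre
  unfold Spec_solution
  by_cases h3 : nums.length < 3
  · simp [solution, solution_alt, h3]
  · by_cases h13 : len_1 < 3
    · rw [solution, solution_alt, if_neg h3, if_pos (Or.inr h13),
          PySem.List.pyRange_one_eq_nil (by omega : len_1 - 1 ≤ 1)]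
      rfl
    · have hle : len_1 ≤ (nums.length : Int) := by
        rcases hpre with h | h | h
        · omega
        · omega
        · exact h
      have hcond : ¬(nums.length < 3 ∨ len_1 < 3) := by omega
      simp only [solution, solution_alt, if_neg h3, if_neg hcond]
      rw [PySem.List.slice_to nums (by omega : (0:Int) ≤ len_1)]
      have halen : (nums.take len_1.toNat).length = len_1.toNat := by
        rw [List.length_take]; omega
      have hcast : ((nums.take len_1.toNat).length : Int) = len_1 := by rw [halen]; omega
      rw [hcast]
      rw [sweep_fold (nums.take len_1.toNat) [] [] [] List.Perm.nil List.Pairwise.nil,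
          sweep_fold (nums.take len_1.toNat).reverse [] [] [] List.Perm.nil List.Pairwise.nil,
          List.nil_append, List.nil_append]
      apply PySem.List.foldl_congr_mem
      intro acc i hi
      obtain ⟨hi1, hi2⟩ := PySem.List.mem_pyRange_one.mp hi
      have hitn : i.toNat < (nums.take len_1.toNat).length := by rw [halen]; omega
      have hitn' : i.toNat < nums.length := by omega
      have hv : PySem.List.pyGetD nums i 0 = (nums.take len_1.toNat)[i.toNat]'hitn := by
        rw [PySem.List.pyGetD_eq_getElem _ _ (by omega) (by exact_mod_cast by omega : i < (nums.length : Int)),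
            List.getElem_take]
      rw [foldl_count_range nums (PySem.List.pyGetD nums i 0) 0 i (le_refl 0) (by omega) (by omega),
          foldl_count_range nums (PySem.List.pyGetD nums i 0) (i + 1) len_1 (by omega) (by omega) hle]
      rw [PySem.List.pyGetD_eq_getElem (lcounts [] (nums.take len_1.toNat)) 0 (by omega)
            (by rw [length_lcounts, halen]; omega),
          PySem.List.pyGetD_eq_getElem ((lcounts [] (nums.take len_1.toNat).reverse).reverse) 0 (by omega)
            (by rw [List.length_reverse, length_lcounts, List.length_reverse, halen]; omega)]
      rw [← List.getD_eq_getElem _ 0, ← List.getD_eq_getElem _ 0]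
      rw [left_getD _ _ hitn, right_getD _ _ hitn]
      congr 1
      simp only [hv, show (0:Int).toNat = 0 from rfl, List.drop_zero, List.take_take,
        show min i.toNat len_1.toNat = i.toNat from by omega,
        show (i + 1).toNat = i.toNat + 1 from by omega]
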